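-- pv_equiv track=rewrite | github.com/heinscr/schools | test_extraction.py | split_table_on_step_columns
-- ===== SOURCE A (Python) =====
-- from typing import Any, Dict, List, Optional, Sequence, Tuple
--
-- def split_table_on_step_columns(table: List[List[str]]) -> List[List[List[str]]]:
--     """Split a table that contains multiple 'Step' headers into separate sub tables."""
--     if not table or not table[0]:
--         return []
--
--     header = table[0]
--     step_indices = [idx for idx, cell in enumerate(header)
--                     if str(cell).strip().upper() == 'STEP']
--
--     if not step_indices or len(step_indices) == 1 and step_indices[0] == 0:
--         return [table]
--
--     sub_tables: List[List[List[str]]] = []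
--     for pos, start in enumerate(step_indices):
--         end = step_indices[pos + 1] if pos + 1 < len(step_indices) else len(header)
--         slice_cols = list(range(start, end))
--         new_table: List[List[str]] = []
--         for row in table:
--             new_row = []
--             for col in slice_cols:
--                 if col < len(row):
--                     new_row.append(row[col])
--                 else:
--                     new_row.append('')
--             new_table.append(new_row)
--         if new_table and str(new_table[0][0]).strip().upper() == 'STEP':
--             sub_tables.append(new_table)
--
--     return sub_tables or [table]
-- ===== SOURCE B (Python) =====
-- def split_table_on_step_columns(table):
--     """Split a table that contains multiple 'Step' headers into separate sub tables."""
--     if not table or not table[0]: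
--         return []
--     header = table[0]
--     # column-major: collect columns into groups, opening a new group at each STEP column;
--     # columns before the first STEP column are dropped (A never includes them either)
--     groups = []
--     for c in range(len(header)):
--         if str(header[c]).strip().upper() == 'STEP':
--             groups.append([])
--         if groups:
--             groups[-1].append([row[c] if c < len(row) else '' for row in table])
--     if not groups or (len(groups) == 1 and len(groups[0]) == len(header)):
--         return [table]
--     return [[list(r) for r in zip(*g)] for g in groups]
-- ===== Notes on version B (the rewrite author's own statement) =====
-- stated objective: alternative
-- what changed: B works column-major: it makes one pass over the header collecting each column (built with a row scan) into groups, opening a new group at every STEP column, then transposes each group of columns back into a sub-table with zip(*g); A works row-major, rebuilding each sub-table row by row from precomputed index ranges, with a per-segment STEP re-check and an 'or [table]' fallback that B drops as provably redundant.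
import Mathlib
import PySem

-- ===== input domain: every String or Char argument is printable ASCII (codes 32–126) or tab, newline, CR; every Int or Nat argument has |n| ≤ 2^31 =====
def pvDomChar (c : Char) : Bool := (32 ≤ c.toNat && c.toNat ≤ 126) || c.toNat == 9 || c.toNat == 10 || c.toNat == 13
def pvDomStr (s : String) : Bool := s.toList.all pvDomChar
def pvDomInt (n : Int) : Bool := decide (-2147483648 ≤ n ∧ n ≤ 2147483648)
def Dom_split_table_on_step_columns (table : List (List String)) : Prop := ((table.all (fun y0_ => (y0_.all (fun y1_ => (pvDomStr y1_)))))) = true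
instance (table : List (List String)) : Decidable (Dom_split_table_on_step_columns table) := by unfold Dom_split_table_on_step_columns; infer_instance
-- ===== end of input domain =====

-- B is column-major: one pass over the header collects each column into groups (a new group opens
-- at every STEP column), then each group of columns is transposed back into a sub-table; A is
-- row-major over precomputed index ranges with a redundant per-segment re-check and fallback.

-- ===== PORT A =====
-- shared helper: the step-index comprehension, identical in A and B's header scan
-- [idx for idx, cell in enumerate(header) if str(cell).strip().upper() == 'STEP']
def pvStepIndices (header : List String) : List Int :=
  ((PySem.List.enumerate header 0).filter
    (fun p => PySem.Str.upper (PySem.Str.strip p.2) == "STEP")).map (·.1)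

def split_table_on_step_columns (table : List (List String)) : List (List (List String)) :=
  if table = [] ∨ table.headD [] = [] then []
  else
    let header := table.headD []
    let step_indices := pvStepIndices header
    if step_indices = [] ∨ (step_indices.length = 1 ∧ step_indices.headD 0 = 0) then [table]
    else
      let sub_tables := (PySem.List.enumerate step_indices 0).foldl (fun acc ps =>
        let start := ps.2
        -- step_indices[pos + 1]: index in range under the guard, so pyGetD is exact
        let e := if ps.1 + 1 < (step_indices.length : Int)
                 then PySem.List.pyGetD step_indices (ps.1 + 1) 0
                 else (header.length : Int)
        let slice_cols := PySem.List.pyRange start e 1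
        let new_table := table.map (fun row =>
          slice_cols.map (fun col =>
            if col < (row.length : Int) then PySem.List.pyGetD row col "" else ""))
        -- new_table[0][0]: in range on every reachable input (first segment of a row is nonempty
        -- because start < e always holds here), so headD is exact
        if new_table ≠ [] ∧
            PySem.Str.upper (PySem.Str.strip ((new_table.headD []).headD "")) = "STEP"
        then acc ++ [new_table] else acc) []
      if sub_tables = [] then [table] else sub_tables

-- ===== PORT B =====
-- zip(*g): exact port of Python zip over the unpacked list of lists — yields the heads while
-- every list is nonempty (zip stops at the shortest), i.e. the rows of the transpose
def pyZipStar (g : List (List String)) : List (List String) :=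
  if h : g ≠ [] ∧ g.all (fun c => !c.isEmpty) then
    (g.map (fun c => c.headD "")) :: pyZipStar (g.map (fun c => c.tail))
  else []
termination_by (g.headD []).length
decreasing_by
  obtain ⟨h1, h2⟩ := h
  cases g with
  | nil => exact absurd rfl h1
  | cons x xs =>
    have hx : x ≠ [] := by
      have := List.all_eq_true.mp h2 x (by simp)
      simpa [List.isEmpty_iff] using this
    have := List.length_pos_of_ne_nil hx
    simp only [List.attach_cons, List.map_cons, List.headD_cons, List.length_tail]
    omega

-- the loop body of B's single pass over the header columns: open a new group on a STEP cell,
-- then append the current column (built by a scan over the rows) to the last open group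
def pvScanStep (header : List String) (table : List (List String))
    (groups : List (List (List String))) (c : Int) : List (List (List String)) :=
  let groups := if PySem.Str.upper (PySem.Str.strip (PySem.List.pyGetD header c "")) = "STEP"
                then groups ++ [([] : List (List String))] else groups
  if groups ≠ [] then
    groups.dropLast ++ [(groups.getLast?.getD []) ++
      [table.map (fun row =>
        if c < (row.length : Int) then PySem.List.pyGetD row c "" else "")]]
  else groups

def split_table_on_step_columns_alt (table : List (List String)) : List (List (List String)) :=
  if table = [] ∨ table.headD [] = [] then []
  else
    let header := table.headD []
    let groups := (PySem.List.pyRange 0 (header.length : Int) 1).foldl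
      (pvScanStep header table) []
    if groups = [] ∨ (groups.length = 1 ∧ (groups.headD []).length = header.length) then [table]
    else groups.map pyZipStar

-- ===== PRECONDITION & SPEC =====
def Spec_split_table_on_step_columns (table : List (List String)) (out : List (List (List String))) : Prop := out = split_table_on_step_columns_alt table
instance (table : List (List String)) (out : List (List (List String))) : Decidable (Spec_split_table_on_step_columns table out) := by unfold Spec_split_table_on_step_columns; infer_instance

-- ===== CLAIM (what is proved, stated in full; the proofs are below) =====
def Claim_equal_split_table_on_step_columns : Prop := ∀ (table : List (List String)), Dom_split_table_on_step_columns table → Spec_split_table_on_step_columns table (split_table_on_step_columns table)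

-- ===== LEMMAS AND PROOFS =====

-- A's sub-table for a boundary pair (row-major)
def pvSeg (table : List (List String)) (p : Int × Int) : List (List String) :=
  table.map (fun row => (PySem.List.pyRange p.1 p.2 1).map (fun c =>
    if c < (row.length : Int) then PySem.List.pyGetD row c "" else ""))

-- B's group of columns for a boundary pair (column-major)
def pvColSeg (table : List (List String)) (p : Int × Int) : List (List String) :=
  (PySem.List.pyRange p.1 p.2 1).map (fun c => table.map (fun row =>
    if c < (row.length : Int) then PySem.List.pyGetD row c "" else ""))

def pvBounds (L : List Int) (n : Int) : List (Int × Int) := L.zip (L.tail ++ [n])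

theorem pvStepIndices_mem (header : List String) (s : Int) (hs : s ∈ pvStepIndices header) :
    ∃ j : Nat, j < header.length ∧ s = (j : Int) ∧
      PySem.Str.upper (PySem.Str.strip (header.getD j "")) = "STEP" := by
  simp only [pvStepIndices, List.mem_map, List.mem_filter] at hs
  obtain ⟨p, ⟨hpe, hpred⟩, rfl⟩ := hs
  rw [PySem.List.mem_enumerate_iff] at hpe
  obtain ⟨k, hk, rfl⟩ := hpe
  refine ⟨k, hk, by simp, ?_⟩
  rw [List.getD_eq_getElem?_getD, List.getElem?_eq_getElem hk]
  simpa using hpred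

theorem pvStepIndices_mem_iff (header : List String) (m : Nat) (hm : m < header.length) :
    (m : Int) ∈ pvStepIndices header ↔
      PySem.Str.upper (PySem.Str.strip (header.getD m "")) = "STEP" := by
  constructor
  · intro h
    obtain ⟨j, hj, hje, hstep⟩ := pvStepIndices_mem header _ h
    have : j = m := by exact_mod_cast hje.symm
    subst this; exact hstep
  · intro h
    simp only [pvStepIndices, List.mem_map, List.mem_filter]
    refine ⟨((m : Int), header[m]), ⟨?_, ?_⟩, rfl⟩
    · rw [PySem.List.mem_enumerate_iff]; exact ⟨m, hm, by simp⟩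
    · rw [List.getD_eq_getElem?_getD, List.getElem?_eq_getElem hm] at h
      simpa using h

theorem pvStepIndices_pairwise (header : List String) :
    (pvStepIndices header).Pairwise (· < ·) := by
  unfold pvStepIndices
  rw [List.pairwise_map]
  exact (PySem.List.pairwise_lt_enumerate header 0).filter _

-- zip(*g) on equal-length columns built as cs.map (fun c => rs.map (f · c)) is the row-major table
theorem pyZipStar_cols (cs : List Int) (hcs : cs ≠ []) :
    ∀ (rs : List (List String)) (f : List String → Int → String),
    pyZipStar (cs.map (fun c => rs.map (fun r => f r c))) = rs.map (fun r => cs.map (fun c => f r c)) := by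
  intro rs
  induction rs with
  | nil =>
    intro f
    rw [pyZipStar]
    rw [dif_neg]
    · simp
    · intro ⟨h1, h2⟩
      obtain ⟨c, cs'⟩ := cs
      · exact hcs rfl
      · have := List.all_eq_true.mp h2 (([] : List String)) (by simp)
        simp at this
  | cons r rs ih =>
    intro f
    rw [pyZipStar]
    rw [dif_pos]
    · simp only [List.map_map, Function.comp_def, List.map_cons, List.headD_cons, List.tail_cons]
      rw [ih (fun r c => f r c)]
    · constructor
      · simp [hcs]
      · rw [List.all_eq_true]
        intro x hx
        simp only [List.mem_map] at hx
        obtain ⟨c, _, rfl⟩ := hx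
        simp

theorem pvBounds_snoc (L : List Int) (m e : Int) :
    pvBounds (L ++ [m]) e = pvBounds L m ++ [(m, e)] := by
  cases L with
  | nil => simp [pvBounds]
  | cons x xs =>
    unfold pvBounds
    simp only [List.cons_append, List.tail_cons]
    rw [show x :: (xs ++ [m]) = (x :: xs) ++ [m] by simp,
        List.zip_append (by simp)]
    simp

theorem pvBounds_cons₂ (x y : Int) (ys : List Int) (e : Int) :
    pvBounds (x :: y :: ys) e = (x, y) :: pvBounds (y :: ys) e := by
  simp [pvBounds, List.zip_cons_cons]

theorem pvBounds_structure (L : List Int) (hL : L ≠ []) :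
    ∃ I s, s ∈ L ∧ ∀ e : Int, pvBounds L e = I ++ [(s, e)] := by
  induction L with
  | nil => exact absurd rfl hL
  | cons x xs ih =>
    cases xs with
    | nil => exact ⟨[], x, by simp, fun e => by simp [pvBounds]⟩
    | cons y ys =>
      obtain ⟨I, s, hs, hI⟩ := ih (by simp)
      exact ⟨(x, y) :: I, s, by simp [List.mem_cons.mp hs],
        fun e => by rw [pvBounds_cons₂, hI e]; simp⟩

-- filter (< m+1) of a sorted list splits off m
theorem pvFilter_lt_succ (L : List Int) (hL : L.Pairwise (· < ·)) (m : Int) :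
    L.filter (fun s => decide (s < m + 1)) =
      L.filter (fun s => decide (s < m)) ++ (if (m : Int) ∈ L then [m] else []) := by
  induction L with
  | nil => simp
  | cons x xs ih =>
    rw [List.pairwise_cons] at hL
    obtain ⟨hx, hxs⟩ := hL
    rcases lt_trichotomy x m with h1 | rfl | h1
    · have hmx : ((m : Int) ∈ x :: xs) ↔ ((m : Int) ∈ xs) := by
        simp only [List.mem_cons]
        constructor
        · rintro (rfl | h')
          · omega
          · exact h'
        · exact Or.inr
      rw [List.filter_cons_of_pos (by simp; omega),
          List.filter_cons_of_pos (by simp; omega), ih hxs]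
      by_cases hm : (m : Int) ∈ xs
      · simp [hm, hmx.mpr hm]
      · simp [hm, show (m : Int) ≠ x by omega]
    · have h1 : xs.filter (fun s => decide (s < x + 1)) = [] :=
        List.filter_eq_nil_iff.mpr (fun s hs => by have := hx s hs; simp; omega)
      have h2 : xs.filter (fun s => decide (s < x)) = [] :=
        List.filter_eq_nil_iff.mpr (fun s hs => by have := hx s hs; simp; omega)
      rw [List.filter_cons_of_pos (by simp), List.filter_cons_of_neg (by simp), h1, h2]
      simp
    · have hnm : ((m : Int) ∉ (x :: xs)) := by
        simp only [List.mem_cons]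
        rintro (rfl | hc)
        · omega
        · have := hx m hc; omega
      rw [List.filter_cons_of_neg (by simp; omega),
          List.filter_cons_of_neg (by simp; omega), ih hxs]
      have hnm' : ((m : Int) ∉ xs) := fun hc => hnm (List.mem_cons_of_mem x hc)
      simp [hnm, hnm']

theorem pvStepIndices_nonneg (header : List String) (s : Int)
    (hs : s ∈ pvStepIndices header) : 0 ≤ s := by
  obtain ⟨j, _, rfl, _⟩ := pvStepIndices_mem header s hs
  exact Int.natCast_nonneg j

theorem pvStepIndices_lt (header : List String) (s : Int)
    (hs : s ∈ pvStepIndices header) : s < (header.length : Int) := by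
  obtain ⟨j, hj, rfl, _⟩ := pvStepIndices_mem header s hs
  exact_mod_cast hj

theorem pvLength_pvBounds (L : List Int) (e : Int) : (pvBounds L e).length = L.length := by
  cases L with
  | nil => simp [pvBounds]
  | cons x xs => simp [pvBounds, List.length_zip, List.length_tail]

-- the column-collecting scan of B builds exactly the boundary groups, column-major
theorem pvScanInv (header : List String) (table : List (List String)) :
    ∀ m : Nat, m ≤ header.length →
    (PySem.List.pyRange 0 (m : Int) 1).foldl (pvScanStep header table) []
    = (pvBounds ((pvStepIndices header).filter (fun s => decide (s < (m : Int)))) (m : Int)).map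
        (pvColSeg table) := by
  intro m
  induction m with
  | zero =>
    intro _
    rw [PySem.List.pyRange_one_eq_nil (by simp)]
    have hf : (pvStepIndices header).filter (fun s => decide (s < ((0 : Nat) : Int))) = [] := by
      apply List.filter_eq_nil_iff.mpr
      intro s hs
      have := pvStepIndices_nonneg header s hs
      simp only [Nat.cast_zero, decide_eq_true_eq]
      omega
    rw [List.foldl_nil, hf]
    simp [pvBounds]
  | succ m ih =>
    intro hm
    have hm' : m < header.length := by omega
    have hc1 : (((m + 1 : Nat)) : Int) = (m : Int) + 1 := by push_cast; ring
    rw [hc1, PySem.List.pyRange_one_succ_right (by positivity), List.foldl_append,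
      ih (by omega), List.foldl_cons, List.foldl_nil]
    rw [pvScanStep]
    have hLm1 : (pvStepIndices header).filter (fun s => decide (s < (m : Int) + 1))
        = (pvStepIndices header).filter (fun s => decide (s < (m : Int)))
          ++ (if ((m : Int)) ∈ pvStepIndices header then [(m : Int)] else []) :=
      pvFilter_lt_succ _ (pvStepIndices_pairwise header) _
    have hmemiff := pvStepIndices_mem_iff header m hm'
    by_cases hP : PySem.Str.upper (PySem.Str.strip (PySem.List.pyGetD header (m : Int) "")) = "STEP"
    · -- a STEP column: a new group opens and receives this column
      have hmem : ((m : Int)) ∈ pvStepIndices header := by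
        apply hmemiff.mpr
        rwa [PySem.List.pyGetD_natCast] at hP
      rw [hLm1, if_pos hmem]
      simp only [hP, if_pos, if_true]
      rw [pvBounds_snoc, List.map_append]
      rw [if_pos (by simp), List.dropLast_concat, List.getLast?_concat]
      simp [pvColSeg, PySem.List.pyRange_one_singleton]
    · -- not a STEP column: it joins the open group, if any
      have hmem : ((m : Int)) ∉ pvStepIndices header := by
        intro hc
        exact hP (by rw [PySem.List.pyGetD_natCast]; exact hmemiff.mp hc)
      rw [hLm1, if_neg hmem, List.append_nil]
      simp only [hP, if_false]
      set Lm := (pvStepIndices header).filter (fun s => decide (s < (m : Int))) with hLmdef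
      by_cases hLm : Lm = []
      · rw [hLm]
        simp [pvBounds]
      · obtain ⟨I, s, hsmem, hI⟩ := pvBounds_structure Lm hLm
        have hs_lt : s < (m : Int) := by
          have := List.of_mem_filter hsmem
          simpa using this
        rw [hI (m : Int), hI ((m : Int) + 1), List.map_append, List.map_append]
        rw [if_pos (by simp), List.map_singleton, List.map_singleton,
          List.dropLast_concat, List.getLast?_concat]
        simp only [Option.getD_some, List.append_cancel_left_eq]
        congr 1
        simp only [pvColSeg]
        rw [PySem.List.pyRange_one_succ_right (by omega), List.map_append]
        simp

-- ===== VERDICT (by name: the statement is the Claim_ definition above) =====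
set_option maxHeartbeats 2000000 in
theorem split_table_on_step_columns_spec : Claim_equal_split_table_on_step_columns := by
  intro table _
  unfold Spec_split_table_on_step_columns
  cases table with
  | nil => rfl
  | cons t0 ts =>
    by_cases ht0 : t0 = []
    · subst ht0; rfl
    · rw [split_table_on_step_columns, split_table_on_step_columns_alt]
      simp only [List.headD_cons]
      have h1' : ¬((t0 :: ts : List (List String)) = [] ∨ t0 = []) := by simp [ht0]
      rw [if_neg h1', if_neg h1']
      have hgroups := pvScanInv t0 (t0 :: ts) t0.length (le_refl _)
      have hfilt : (pvStepIndices t0).filter (fun s => decide (s < ((t0.length : Nat) : Int)))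
          = pvStepIndices t0 :=
        List.filter_eq_self.mpr (fun s hs => by
          have := pvStepIndices_lt t0 s hs
          simp only [decide_eq_true_iff]
          omega)
      rw [hfilt] at hgroups
      rw [hgroups]
      set L := pvStepIndices t0 with hL
      -- facts about L
      have hLget : ∀ k, (hk : k < L.length) → ∃ j : Nat, j < t0.length ∧ L[k] = (j : Int) ∧
          PySem.Str.upper (PySem.Str.strip (t0.getD j "")) = "STEP" := by
        intro k hk
        exact pvStepIndices_mem t0 L[k] (L.getElem_mem hk)
      have hlt : ∀ k, (hk : k + 1 < L.length) → L[k]'(by omega) < L[k+1]'(by omega) := by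
        intro k hk
        exact List.pairwise_iff_getElem.mp (show L.Pairwise (· < ·) from pvStepIndices_pairwise t0)
          k (k+1) (by omega) hk (by omega)
      have hn1 : 0 < t0.length := List.length_pos_of_ne_nil ht0
      have hEnd : ∀ k, (hk : k < L.length) →
          (if ((k : Nat) : Int) + 1 < (L.length : Int)
            then PySem.List.pyGetD L (((k : Nat) : Int) + 1) 0
            else ((t0.length : Nat) : Int))
          = (L.tail ++ [((t0.length : Nat) : Int)])[k]'(by
              simp only [List.length_append, List.length_tail, List.length_cons,
                List.length_nil]
              omega) := by
        intro k hk
        by_cases hk1 : k + 1 < L.length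
        · rw [if_pos (by exact_mod_cast hk1)]
          rw [show ((k : Int) + 1) = ((k + 1 : Nat) : Int) by omega]
          rw [PySem.List.pyGetD_natCast, List.getD_eq_getElem?_getD,
            List.getElem?_eq_getElem hk1]
          rw [List.getElem_append_left (by simp [List.length_tail]; omega)]
          simp [List.getElem_tail]
        · rw [if_neg (by omega)]
          rw [List.getElem_append_right (by simp [List.length_tail]; omega)]
          simp
      have hBval : ∀ k, (hk : k < L.length) → ∀ a : Nat, L[k] = (a : Int) → a < t0.length →
          ∃ b : Nat, (L.tail ++ [((t0.length : Nat) : Int)])[k]'(by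
              simp only [List.length_append, List.length_tail, List.length_cons,
                List.length_nil]
              omega) = (b : Int) ∧ a < b := by
        intro k hk a hLa han
        by_cases hk1 : k + 1 < L.length
        · obtain ⟨b, hbn, hLb, _⟩ := hLget (k+1) hk1
          refine ⟨b, ?_, ?_⟩
          · rw [List.getElem_append_left (by simp [List.length_tail]; omega)]
            simpa [List.getElem_tail] using hLb
          · have := hlt k hk1
            rw [hLa, hLb] at this
            exact_mod_cast this
        · refine ⟨t0.length, ?_, han⟩
          rw [List.getElem_append_right (by simp [List.length_tail]; omega)]
          simp
      -- the boundary pairs have strictly increasing endpoints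
      have hpair : ∀ k, (hk : k < (pvBounds L ((t0.length : Nat) : Int)).length) →
          ∃ a b : Nat, (pvBounds L ((t0.length : Nat) : Int))[k] = ((a : Int), (b : Int)) ∧
            a < b ∧ a < t0.length := by
        intro k hk
        rw [pvLength_pvBounds] at hk
        obtain ⟨a, han, hLa, _⟩ := hLget k hk
        obtain ⟨b, hbeq, hab⟩ := hBval k hk a hLa han
        refine ⟨a, b, ?_, hab, han⟩
        simp only [pvBounds, List.getElem_zip]
        rw [hLa, hbeq]
      -- guard equivalence and the main branch
      by_cases hguard : L = [] ∨ (L.length = 1 ∧ L.headD 0 = 0)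
      · -- trivial split: A and B both return [table]
        rw [if_pos hguard, if_pos ?_]
        rcases hguard with hnil | ⟨hlen1, hhead⟩
        · exact Or.inl (by simp [hnil, pvBounds])
        · obtain ⟨s0, hL0⟩ : ∃ s0, L = [s0] := by
            cases hLc : L with
            | nil => rw [hLc] at hlen1; simp at hlen1
            | cons x xs =>
              rw [hLc] at hlen1
              have hxs : xs = [] := by simpa using hlen1
              exact ⟨x, by rw [hxs]⟩
          have hs0 : s0 = 0 := by rw [hL0] at hhead; simpa using hhead
          refine Or.inr ⟨by simp [hL0, pvBounds], ?_⟩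
          rw [hL0, hs0]
          simp [pvBounds, pvColSeg, PySem.List.length_pyRange_one]
      · -- both guards fail; the split is the boundary list, row- vs column-major
        have hLne : L ≠ [] := fun h => hguard (Or.inl h)
        have hL1 : 0 < L.length := List.length_pos_of_ne_nil hLne
        have hBguard : ¬((pvBounds L ((t0.length : Nat) : Int)).map (pvColSeg (t0 :: ts)) = [] ∨
            ((pvBounds L ((t0.length : Nat) : Int)).map (pvColSeg (t0 :: ts))).length = 1 ∧
            (((pvBounds L ((t0.length : Nat) : Int)).map (pvColSeg (t0 :: ts))).headD []).length = t0.length) := by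
          push_neg
          refine ⟨by
            apply List.ne_nil_of_length_pos
            rw [List.length_map, pvLength_pvBounds]
            omega, fun hlen1 => ?_⟩
          rw [List.length_map, pvLength_pvBounds] at hlen1
          obtain ⟨s0, hL0⟩ : ∃ s0, L = [s0] := by
            cases hLc : L with
            | nil => rw [hLc] at hlen1; simp at hlen1
            | cons x xs =>
              rw [hLc] at hlen1
              have hxs : xs = [] := by simpa using hlen1
              exact ⟨x, by rw [hxs]⟩
          have hs0ne : s0 ≠ 0 := by
            intro hc
            exact hguard (Or.inr ⟨by rw [hL0]; rfl, by rw [hL0, hc]; rfl⟩)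
          have hs0pos : 0 < s0 := by
            have := pvStepIndices_nonneg t0 s0 (by show s0 ∈ L; rw [hL0]; exact List.mem_singleton_self s0)
            omega
          have hs0lt : s0 < (t0.length : Int) := pvStepIndices_lt t0 s0 (by show s0 ∈ L; rw [hL0]; exact List.mem_singleton_self s0)
          rw [hL0]
          simp only [pvBounds, List.tail_cons, List.nil_append, List.zip_cons_cons,
            List.zip_nil_right, List.map_cons, List.map_nil, List.headD_cons]
          simp only [pvColSeg, List.length_map, PySem.List.length_pyRange_one]
          omega
        rw [if_neg hguard, if_neg hBguard]
        rw [PySem.List.foldl_append_ite, List.filter_eq_self.mpr ?hall]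
        case hall =>
          intro ps hmem
          rw [decide_eq_true_iff]
          rw [PySem.List.mem_enumerate_iff] at hmem
          obtain ⟨k, hk, rfl⟩ := hmem
          simp only [List.map_cons, List.headD_cons, zero_add]
          refine ⟨by simp, ?_⟩
          rw [hEnd k hk]
          obtain ⟨a, han, hLa, hstep⟩ := hLget k hk
          obtain ⟨b, hbeq, hab⟩ := hBval k hk a hLa han
          rw [hbeq, hLa]
          rw [PySem.List.pyRange_one_cons (by exact_mod_cast hab)]
          simp only [List.map_cons, List.headD_cons]
          rw [if_pos (by exact_mod_cast han)]
          rw [PySem.List.pyGetD_natCast]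
          exact hstep
        simp only [List.nil_append]
        have hmain : (PySem.List.enumerate L 0).map (fun ps =>
            (t0 :: ts).map (fun row =>
              (PySem.List.pyRange ps.2 (if ps.1 + 1 < (L.length : Int)
                  then PySem.List.pyGetD L (ps.1 + 1) 0
                  else ((t0.length : Nat) : Int)) 1).map (fun col =>
                if col < (row.length : Int) then PySem.List.pyGetD row col "" else "")))
            = (pvBounds L ((t0.length : Nat) : Int)).map (pvSeg (t0 :: ts)) := by
          apply List.ext_getElem
          · simp [PySem.List.length_enumerate, pvLength_pvBounds]
          · intro k hk1 hk2
            have hkL : k < L.length := by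
              simpa [PySem.List.length_enumerate] using hk1
            simp only [List.getElem_map]
            rw [PySem.List.getElem_enumerate]
            simp only [zero_add]
            rw [hEnd k hkL]
            simp only [pvSeg, pvBounds, List.getElem_zip]
        rw [hmain]
        rw [if_neg (by
          apply List.ne_nil_of_length_pos
          rw [List.length_map, pvLength_pvBounds]
          omega)]
        -- column-major groups transpose to the row-major sub-tables
        rw [List.map_map]
        apply List.ext_getElem
        · simp
        · intro k hk1 hk2
          simp only [List.getElem_map, Function.comp_apply]
          obtain ⟨a, b, hpk, hab, _⟩ := hpair k (by simpa using hk2)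
          rw [hpk]
          have hcs : PySem.List.pyRange (a : Int) (b : Int) 1 ≠ [] := by
            apply List.ne_nil_of_length_pos
            rw [PySem.List.length_pyRange_one]
            omega
          have hz := pyZipStar_cols (PySem.List.pyRange (a : Int) (b : Int) 1) hcs (t0 :: ts)
            (fun r c => if c < (r.length : Int) then PySem.List.pyGetD r c "" else "")
          simpa [pvColSeg, pvSeg] using hz.symm
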